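-- pv_equiv track=rewrite | github.com/coroche/webapp | app/library/SolveBoard.py | checkRedund
-- ===== SOURCE A (Python) =====
-- def checkRedund(sol):
-- 	#for each equation in a solution check that the result is used later in the solution
-- 	#adds space before each equation so that searching ' ans ' will only search whole operands
-- 	for i,eq in enumerate(sol[:-1]):
-- 		ans=' '+eq[eq.find('=')+2:]+' '
-- 		altEq=[' '+j for j in sol[i+1:]]
-- 		ansUsed=[ans in j for j in altEq]
-- 		if not True in ansUsed:
-- 			return True
-- 	return False
-- ===== SOURCE B (Python) =====
-- def checkRedund(sol):
--     # Different structure: pad all lines and answers once; for each equation look up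
--     # (memoised per distinct answer) the LAST index whose padded line contains the
--     # answer, found by one backward scan stopping at the first hit; the answer is
--     # unused later iff that last occurrence is not beyond the equation's own index.
--     n = len(sol)
--     answers = [' ' + eq[eq.find('=') + 2:] + ' ' for eq in sol[:-1]]
--     padded = [' ' + s for s in sol]
--     last = {}
--     for i in range(n - 1):
--         a = answers[i]
--         if a not in last:
--             hit = 0
--             for j in range(n - 1, 0, -1):
--                 if a in padded[j]:
--                     hit = j
--                     break
--             last[a] = hit
--         if last[a] <= i:
--             return True
--     return False
-- ===== Notes on version B (the rewrite author's own statement) =====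
-- stated objective: alternative
-- what changed: Instead of rescanning the whole tail for every equation, B pads all lines and answers once, memoises per distinct answer the LAST index whose padded line contains it (scanning from the end with early break), and reports an unused answer iff that last occurrence is not beyond its own index.
import Mathlib
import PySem

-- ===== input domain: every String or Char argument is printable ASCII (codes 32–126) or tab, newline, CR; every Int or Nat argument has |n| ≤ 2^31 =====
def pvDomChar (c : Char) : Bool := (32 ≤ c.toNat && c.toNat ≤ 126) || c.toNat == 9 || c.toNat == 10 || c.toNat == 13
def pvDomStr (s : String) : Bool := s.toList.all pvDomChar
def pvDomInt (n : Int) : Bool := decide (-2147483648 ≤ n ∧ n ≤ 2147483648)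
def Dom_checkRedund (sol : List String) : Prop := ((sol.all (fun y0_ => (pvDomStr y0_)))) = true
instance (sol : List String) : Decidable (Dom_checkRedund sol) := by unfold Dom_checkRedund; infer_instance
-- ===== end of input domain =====

-- B replaces A's per-equation rescan of the whole tail by a memoised last-occurrence
-- lookup per distinct answer (alternative decomposition; return value only, no mutation).

-- ===== PORT A =====
-- ans = ' ' + eq[eq.find('=')+2:] + ' '   (shared by both Pythons verbatim)
def pvAns (eq : String) : List Char :=
  ' ' :: PySem.Chars.slice eq.toList (some (PySem.Chars.find eq.toList ['='] + 2)) none ++ [' ']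

-- the for-loop of A with its early return
def checkRedundA_go (sol : List String) : List (Int × String) → Bool
  | [] => false
  | (i, eq) :: rest =>
    let ans := pvAns eq
    let altEq := (PySem.List.slice sol (some (i + 1)) none).map (fun j => ' ' :: j.toList)
    let ansUsed := altEq.map (fun j => PySem.Chars.isIn ans j)
    if !(ansUsed.contains true) then true else checkRedundA_go sol rest

def checkRedund (sol : List String) : Bool :=
  checkRedundA_go sol (PySem.List.enumerate (PySem.List.slice sol none (some (-1))) 0)

-- ===== PORT B =====
-- inner loop of Source B: for j in range(n-1, 0, -1): if a in padded[j]: hit = j; break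
def pvLastHit (padded : List (List Char)) (a : List Char) : Nat → Nat
  | 0 => 0
  | j + 1 => if PySem.Chars.isIn a (padded.getD (j + 1) []) then j + 1 else pvLastHit padded a j

-- the for-i loop of Source B: memoise last[a] on first sight, early return on last[a] <= i
def checkRedundB_go (padded : List (List Char)) (answers : List (List Char)) (n : Nat)
    (d : PySem.Dict (List Char) Nat) : List Nat → Bool
  | [] => false
  | i :: rest =>
    let a := answers.getD i []
    let d' := if d.contains a then d else d.insert a (pvLastHit padded a (n - 1))
    if d'.getD a 0 ≤ i then true else checkRedundB_go padded answers n d' rest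

def checkRedund_alt (sol : List String) : Bool :=
  let n := sol.length
  let answers := (PySem.List.slice sol none (some (-1))).map pvAns
  let padded := sol.map (fun s => ' ' :: s.toList)
  checkRedundB_go padded answers n PySem.Dict.empty (List.range (n - 1))

-- ===== PRECONDITION & SPEC =====
def Spec_checkRedund (sol : List String) (out : Bool) : Prop := out = checkRedund_alt sol
instance (sol : List String) (out : Bool) : Decidable (Spec_checkRedund sol out) := by unfold Spec_checkRedund; infer_instance

-- ===== CLAIM (what is proved, stated in full; the proofs are below) =====
def Claim_equal_checkRedund : Prop := ∀ (sol : List String), Dom_checkRedund sol → Spec_checkRedund sol (checkRedund sol)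

-- ===== LEMMAS AND PROOFS =====

theorem goA_eq_any (sol : List String) (l : List (Int × String)) :
    checkRedundA_go sol l =
      l.any (fun p =>
        !(((PySem.List.slice sol (some (p.1 + 1)) none).map (fun j => ' ' :: j.toList)).map
            (fun j => PySem.Chars.isIn (pvAns p.2) j)).contains true) := by
  induction l with
  | nil => rfl
  | cons p rest ih =>
    obtain ⟨i, eq⟩ := p
    simp only [checkRedundA_go, List.any_cons, ih]
    cases h : (((PySem.List.slice sol (some (i + 1)) none).map (fun j => ' ' :: j.toList)).map
        (fun j => PySem.Chars.isIn (pvAns eq) j)).contains true <;>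
      simp

-- pvLastHit m ≤ i  ↔  no match at any index in (i, m]
theorem pvLastHit_le_iff (padded : List (List Char)) (a : List Char) (i : Nat) :
    ∀ m, (pvLastHit padded a m ≤ i ↔ ∀ j, i < j → j ≤ m → PySem.Chars.isIn a (padded.getD j []) = false) := by
  intro m
  induction m with
  | zero => simp [pvLastHit]; omega
  | succ m ih =>
    by_cases h : PySem.Chars.isIn a (padded.getD (m + 1) []) = true
    · simp only [pvLastHit, h, if_true]
      constructor
      · intro hle j h1 h2
        exfalso
        have := h  -- the match at m+1 lies outside (i, m+1] only if m+1 ≤ i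
        omega
      · intro hall
        by_contra hlt
        have := hall (m + 1) (by omega) (by omega)
        rw [h] at this; cases this
    · have h' : PySem.Chars.isIn a (padded.getD (m + 1) []) = false := by
        cases hx : PySem.Chars.isIn a (padded.getD (m + 1) []) with
        | false => rfl
        | true => exact absurd hx h
      simp only [pvLastHit]
      rw [if_neg h, ih]
      constructor
      · intro hall j h1 h2
        rcases Nat.lt_or_ge j (m + 1) with hj | hj
        · exact hall j h1 (by omega)
        · have : j = m + 1 := by omega
          rw [this]; exact h'
      · intro hall j h1 h2; exact hall j h1 (by omega)

-- the memoising fold: invariant "every stored value is f key"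
def pvInv (f : List Char → Nat) (d : PySem.Dict (List Char) Nat) : Prop :=
  ∀ k v, d.get? k = some v → v = f k

theorem pvInv_step (f : List Char → Nat) (d : PySem.Dict (List Char) Nat) (a : List Char)
    (h : pvInv f d) :
    pvInv f (if d.contains a then d else d.insert a (f a)) := by
  by_cases hc : d.contains a
  · rwa [if_pos hc]
  · rw [if_neg hc]
    intro k v hk
    by_cases hka : k = a
    · subst hka
      rw [PySem.Dict.get?_insert_self] at hk
      exact (Option.some_inj.mp hk).symm
    · rw [PySem.Dict.get?_insert_of_ne _ _ hka] at hk
      exact h k v hk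

theorem pvStep_contains (f : List Char → Nat) (d : PySem.Dict (List Char) Nat) (a : List Char) :
    (if d.contains a then d else d.insert a (f a)).contains a = true := by
  by_cases hc : d.contains a
  · rwa [if_pos hc]
  · rw [if_neg hc]
    exact PySem.Dict.contains_insert_self _ _ _

theorem pvGetD_of_inv (f : List Char → Nat) (d : PySem.Dict (List Char) Nat) (a : List Char)
    (hinv : pvInv f d) (hc : d.contains a = true) : d.getD a 0 = f a := by
  cases hg : d.get? a with
  | none =>
    have := (PySem.Dict.get?_eq_none_iff_contains (d := d) (k := a)).mp hg
    rw [this] at hc; cases hc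
  | some v =>
    rw [PySem.Dict.getD_of_get?_eq_some _ _ hg]
    exact hinv a v hg

theorem goB_eq_any (padded : List (List Char)) (answers : List (List Char)) (n : Nat)
    (l : List Nat) (d : PySem.Dict (List Char) Nat)
    (hinv : pvInv (fun a => pvLastHit padded a (n - 1)) d) :
    checkRedundB_go padded answers n d l =
      l.any (fun i => decide (pvLastHit padded (answers.getD i []) (n - 1) ≤ i)) := by
  induction l generalizing d with
  | nil => rfl
  | cons i rest ih =>
    simp only [checkRedundB_go, List.any_cons]
    have hinv' := pvInv_step (fun a => pvLastHit padded a (n - 1)) d (answers.getD i []) hinv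
    have hc := pvStep_contains (fun a => pvLastHit padded a (n - 1)) d (answers.getD i [])
    rw [pvGetD_of_inv _ _ _ hinv' hc, ih _ hinv']
    by_cases hle : pvLastHit padded (answers.getD i []) (n - 1) ≤ i
    · rw [if_pos hle, decide_eq_true hle, Bool.true_or]
    · rw [if_neg hle, decide_eq_false hle, Bool.false_or]

-- the common characterisation: some equation before the last has no later line containing its answer
def pvCond (sol : List String) : Prop :=
  ∃ k, k < sol.length - 1 ∧ ∀ j, k < j → j < sol.length →
    PySem.Chars.isIn (pvAns (sol.getD k "")) (' ' :: (sol.getD j "").toList) = false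

theorem pvInner_iff (sol : List String) (a : List Char) (k : Nat) :
    ((!(((PySem.List.slice sol (some ((0:Int) + k + 1)) none).map (fun j => ' ' :: j.toList)).map
        (fun j => PySem.Chars.isIn a j)).contains true) = true)
      ↔ ∀ j, k < j → j < sol.length → PySem.Chars.isIn a (' ' :: (sol.getD j "").toList) = false := by
  have h0 : (0:Int) + (k : Int) + 1 = ((k + 1 : Nat) : Int) := by push_cast; ring
  rw [h0, PySem.List.slice_from_natCast]
  simp only [Bool.not_eq_true', List.contains_eq_mem, decide_eq_false_iff_not, List.mem_map,
    not_exists, not_and, List.map_map, Function.comp]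
  constructor
  · intro h j hkj hjn
    have hmem : sol.getD j "" ∈ sol.drop (k + 1) := by
      have hj : j - (k + 1) < (sol.drop (k + 1)).length := by
        rw [List.length_drop]; omega
      have : (sol.drop (k + 1))[j - (k + 1)] = sol.getD j "" := by
        rw [List.getElem_drop, List.getD_eq_getElem _ _ (by omega)]
        congr 1; omega
      rw [← this]
      exact List.getElem_mem hj
    have := h _ hmem
    cases hx : PySem.Chars.isIn a (' ' :: (sol.getD j "").toList) with
    | false => rfl
    | true => exact absurd hx this
  · intro h x hx
    obtain ⟨i, hi, rfl⟩ := List.mem_iff_getElem.mp hx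
    have hlen : k + 1 + i < sol.length := by
      have := hi; rw [List.length_drop] at this; omega
    rw [List.getElem_drop]
    have hg : sol[k + 1 + i] = sol.getD (k + 1 + i) "" := (List.getD_eq_getElem _ _ hlen).symm
    rw [hg]
    intro hcontra
    have := h (k + 1 + i) (by omega) hlen
    rw [this] at hcontra; cases hcontra

theorem pvA_iff (sol : List String) : checkRedund sol = true ↔ pvCond sol := by
  unfold checkRedund
  rw [goA_eq_any, PySem.List.slice_to_neg_one, List.any_eq_true]
  constructor
  · rintro ⟨p, hp, hf⟩
    rw [PySem.List.mem_enumerate_iff] at hp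
    obtain ⟨k, hk, rfl⟩ := hp
    have hk' : k < sol.length - 1 := by
      have := hk; rw [List.length_dropLast] at this; omega
    refine ⟨k, hk', ?_⟩
    have hd : sol.dropLast[k] = sol.getD k "" := by
      rw [List.getElem_dropLast, List.getD_eq_getElem _ _ (by omega)]
    rw [hd] at hf
    exact (pvInner_iff sol _ k).mp hf
  · rintro ⟨k, hk, hall⟩
    have hk' : k < sol.dropLast.length := by rw [List.length_dropLast]; omega
    refine ⟨((0:Int) + k, sol.dropLast[k]), ?_, ?_⟩
    · rw [PySem.List.mem_enumerate_iff]
      exact ⟨k, hk', rfl⟩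
    · have hd : sol.dropLast[k] = sol.getD k "" := by
        rw [List.getElem_dropLast, List.getD_eq_getElem _ _ (by omega)]
      rw [hd]
      exact (pvInner_iff sol _ k).mpr hall

theorem pvAnswers_getD (sol : List String) (i : Nat) (h : i < sol.length - 1) :
    ((PySem.List.slice sol none (some (-1))).map pvAns).getD i [] = pvAns (sol.getD i "") := by
  rw [PySem.List.slice_to_neg_one]
  have h1 : i < (sol.dropLast.map pvAns).length := by
    rw [List.length_map, List.length_dropLast]; omega
  rw [List.getD_eq_getElem _ _ h1, List.getElem_map, List.getElem_dropLast,
    List.getD_eq_getElem _ _ (by omega)]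

theorem pvB_iff (sol : List String) : checkRedund_alt sol = true ↔ pvCond sol := by
  unfold checkRedund_alt
  rw [goB_eq_any _ _ _ _ _ (by intro k v hk; rw [PySem.Dict.get?_empty] at hk; cases hk)]
  simp only [List.any_eq_true, List.mem_range, decide_eq_true_eq]
  constructor
  · rintro ⟨i, hi, hle⟩
    refine ⟨i, hi, ?_⟩
    rw [pvAnswers_getD sol i hi] at hle
    have := (pvLastHit_le_iff (sol.map (fun s => ' ' :: s.toList)) (pvAns (sol.getD i "")) i
      (sol.length - 1)).mp hle
    intro j hij hjn
    have hpj : (sol.map (fun s => ' ' :: s.toList)).getD j [] = ' ' :: (sol.getD j "").toList := by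
      have hj : j < (sol.map (fun s => ' ' :: s.toList)).length := by rw [List.length_map]; omega
      rw [List.getD_eq_getElem _ _ hj, List.getElem_map, List.getD_eq_getElem _ _ (by omega)]
    rw [← hpj]
    exact this j hij (by omega)
  · rintro ⟨i, hi, hall⟩
    refine ⟨i, hi, ?_⟩
    rw [pvAnswers_getD sol i hi, pvLastHit_le_iff]
    intro j hij hjm
    have hjn : j < sol.length := by omega
    have hpj : (sol.map (fun s => ' ' :: s.toList)).getD j [] = ' ' :: (sol.getD j "").toList := by
      have hj : j < (sol.map (fun s => ' ' :: s.toList)).length := by rw [List.length_map]; omega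
      rw [List.getD_eq_getElem _ _ hj, List.getElem_map, List.getD_eq_getElem _ _ (by omega)]
    rw [hpj]
    exact hall j hij hjn

-- ===== VERDICT (by name: the statement is the Claim_ definition above) =====
theorem checkRedund_spec : Claim_equal_checkRedund := by
  intro sol _
  show checkRedund sol = checkRedund_alt sol
  rw [Bool.eq_iff_iff, pvA_iff, pvB_iff]
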